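-- pv_equiv track=rewrite | github.com/csm10495/pycopier | pycopier/__main__.py | coerceArgsToArgparseCompatible
-- ===== SOURCE A (Python) =====
-- def coerceArgsToArgparseCompatible(args):
--     '''
--     Turns /MT:<num> into /MT <num> ... without the user knowing.
--         This is to keep compatibility with robocopy
--     '''
--     args = list(args)
--     for idx, arg in enumerate(args):
--         if arg.startswith('/MT:') and arg.count(':') == 1:
--             args[idx] = '/MT'
--             args.insert(idx + 1, arg.split(':')[-1])
--         elif arg.startswith('--'):
--             # coerce to // prefix
--             args[idx]= arg.replace('-', '/', 2)
--         elif arg.startswith('-'):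
--             # coerce to / prefix
--             args[idx]= arg.replace('-', '/', 1)
--
--     return args
-- ===== SOURCE B (Python) =====
-- def coerceArgsToArgparseCompatible(args):
--     def transform(arg):
--         if arg.startswith('/MT:') and arg.count(':') == 1:
--             return ['/MT'] + transform(arg[4:])
--         if arg.startswith('--'):
--             return ['//' + arg[2:]]
--         if arg.startswith('-'):
--             return ['/' + arg[1:]]
--         return [arg]
--     out = []
--     for arg in args:
--         out.extend(transform(arg))
--     return out
-- ===== Notes on version B (the rewrite author's own statement) =====
-- stated objective: simpler
-- what changed: Replaces A's in-place index loop that mutates the list (insert the /MT payload and re-visit it next iteration) with a pure recursive per-token transform whose results are concatenated into a fresh output list; the '-'/'--' coercions become prefix rewrites ('/'+arg[1:], '//'+arg[2:]) instead of count-limited replace calls.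
import Mathlib
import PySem

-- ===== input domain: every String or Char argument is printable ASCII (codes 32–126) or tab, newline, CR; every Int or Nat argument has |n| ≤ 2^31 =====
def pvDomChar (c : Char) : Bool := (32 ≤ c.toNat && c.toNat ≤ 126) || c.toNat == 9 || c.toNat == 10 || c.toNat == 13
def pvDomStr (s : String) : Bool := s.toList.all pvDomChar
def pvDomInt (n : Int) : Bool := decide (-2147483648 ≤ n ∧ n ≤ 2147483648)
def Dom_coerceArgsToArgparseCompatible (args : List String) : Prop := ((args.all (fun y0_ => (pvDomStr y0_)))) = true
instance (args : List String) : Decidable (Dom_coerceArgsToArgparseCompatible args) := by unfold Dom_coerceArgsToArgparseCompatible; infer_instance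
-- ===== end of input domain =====

-- B replaces A's in-place insert-and-revisit index loop by a pure recursive per-token
-- expansion flat-mapped over the input (objective: simpler; A's argument list is not mutated,
-- matching A's list(args) copy).

-- ===== PORT A =====

-- Characterisation of PySem.Chars.count.go for a single-character needle
-- (needed by pvMT_split below, which the A-port cites for termination).
lemma pvCountGo_single (c : Char) : ∀ (fuel : Nat) (l : List Char) (acc : Nat), l.length ≤ fuel →
    PySem.Chars.count.go [c] fuel l acc = acc + l.count c := by
  intro fuel
  induction fuel with
  | zero =>
    intro l acc h
    rw [List.length_eq_zero_iff.mp (Nat.le_zero.mp h)]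
    rw [PySem.Chars.count.go]
    simp
  | succ n ih =>
    intro l acc h
    match l with
    | [] => rw [PySem.Chars.count.go]; simp; omega
    | x :: t =>
      rw [PySem.Chars.count.go]
      by_cases hx : x = c
      · have : [c].isPrefixOf (x :: t) = true := by simp [List.isPrefixOf, hx]
        rw [if_pos this]
        simp only [List.length_singleton, List.drop_succ_cons, List.drop_zero]
        rw [ih t (acc+1) (by simpa using Nat.le_of_succ_le_succ h)]
        simp [hx]
        ring
      · have : [c].isPrefixOf (x :: t) = false := by simp [List.isPrefixOf]; exact fun e => hx e.symm
        rw [if_neg (by simp [this])]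
        rw [ih t acc (by simpa using Nat.le_of_succ_le_succ h)]
        have hbc : (x == c) = false := by simpa using hx
        simp [List.count_cons, hbc]

lemma pvCount_single (c : Char) (l : List Char) : PySem.Chars.count l [c] = l.count c := by
  unfold PySem.Chars.count
  simp [pvCountGo_single c l.length l 0 (le_refl _)]

-- PySem.Chars.splitOn.go on a separator-free remainder emits exactly one more piece.
lemma pvSplitGoFree : ∀ (fuel : Nat) (l cur : List Char) (acc : List (List Char)), l.length ≤ fuel → ':' ∉ l →
    PySem.Chars.splitOn.go [':'] fuel l cur acc = acc.reverse ++ [cur.reverse ++ l] := by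
  intro fuel
  induction fuel with
  | zero =>
    intro l cur acc h _
    rw [List.length_eq_zero_iff.mp (Nat.le_zero.mp h)]
    rw [PySem.Chars.splitOn.go]
    simp
  | succ n ih =>
    intro l cur acc h hl
    match l with
    | [] => rw [PySem.Chars.splitOn.go]; simp; omega
    | x :: t =>
      have hx : x ≠ ':' := fun e => hl (by simp [e])
      rw [PySem.Chars.splitOn.go]
      have hp : [':'].isPrefixOf (x :: t) = false := by
        simp [List.isPrefixOf]; exact fun e => hx e.symm
      rw [if_neg (by simp [hp])]
      rw [ih t (x :: cur) acc (by simpa using Nat.le_of_succ_le_succ h)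
        (fun e => hl (by simp [e]))]
      simp

-- A string with exactly one ':' splits into its two ':'-free halves.
lemma pvSplitGoOne : ∀ (u : List Char) (fuel : Nat) (v cur : List Char) (acc : List (List Char)),
    u.length + 1 + v.length ≤ fuel → ':' ∉ u → ':' ∉ v →
    PySem.Chars.splitOn.go [':'] fuel (u ++ ':' :: v) cur acc = acc.reverse ++ [cur.reverse ++ u, v] := by
  intro u
  induction u with
  | nil =>
    intro fuel v cur acc h _ hv
    match fuel with
    | 0 => simp at h
    | n + 1 =>
      simp only [List.nil_append]
      rw [PySem.Chars.splitOn.go]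
      have hp : [':'].isPrefixOf (':' :: v) = true := by simp [List.isPrefixOf]
      rw [if_pos hp]
      simp only [List.length_singleton, List.drop_succ_cons, List.drop_zero]
      rw [pvSplitGoFree n v [] (cur.reverse :: acc) (by simp at h; omega) hv]
      simp
  | cons x u' ih =>
    intro fuel v cur acc h hu hv
    have hx : x ≠ ':' := fun e => hu (by simp [e])
    match fuel with
    | 0 => simp at h
    | n + 1 =>
      simp only [List.cons_append]
      rw [PySem.Chars.splitOn.go]
      have hp : [':'].isPrefixOf (x :: (u' ++ ':' :: v)) = false := by
        simp [List.isPrefixOf]; exact fun e => hx e.symm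
      rw [if_neg (by simp [hp])]
      rw [ih n v (x :: cur) acc (by simp at h ⊢; omega) (fun e => hu (by simp [e])) hv]
      simp

lemma pvSplitOne (u v : List Char) (hu : ':' ∉ u) (hv : ':' ∉ v) :
    PySem.Chars.splitOn (u ++ ':' :: v) [':'] = [u, v] := by
  unfold PySem.Chars.splitOn
  rw [pvSplitGoOne u _ v [] [] (by simp; omega) hu hv]
  simp

-- Under A's '/MT:'-branch guard: the argument holds a ':', its tail past '/MT:' holds none,
-- and arg.split(':')[-1] is exactly that tail.  Cited by the A-port's decreasing_by.
lemma pvMT_split (arg : String) (h1 : PySem.Str.startswith arg "/MT:" = true)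
    (h2 : PySem.Str.count arg ":" = 1) :
    ':' ∈ arg.toList ∧ ':' ∉ arg.toList.drop 4 ∧
    ((PySem.List.pyGet? ((PySem.Str.split? arg ":").getD []) (-1)).getD "")
      = String.ofList (arg.toList.drop 4) := by
  have hpre : ("/MT:".toList) <+: arg.toList := by
    rw [PySem.Str.startswith_eq] at h1
    exact (PySem.Chars.startswith_iff _ _).mp h1
  obtain ⟨v, hv⟩ := hpre
  have harg : arg.toList = ['/', 'M', 'T', ':'] ++ v := hv.symm
  have hc : PySem.Chars.count arg.toList [':'] = 1 := by
    have : (":".toList) = [':'] := rfl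
    rw [PySem.Str.count_eq, this] at h2
    exact h2
  rw [pvCount_single, harg] at hc
  simp at hc
  have hvfree : ':' ∉ v := List.count_eq_zero.mp hc
  have hdrop : arg.toList.drop 4 = v := by rw [harg]; rfl
  refine ⟨by rw [harg]; simp, by rw [hdrop]; exact hvfree, ?_⟩
  have hsplit : PySem.Str.split? arg ":" = some [String.ofList ['/', 'M', 'T'], String.ofList v] := by
    unfold PySem.Str.split?
    unfold PySem.Chars.split?
    have hsep : (":".toList) = [':'] := rfl
    have : arg.toList = ['/', 'M', 'T'] ++ ':' :: v := by rw [harg]; rfl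
    rw [hsep, this, pvSplitOne ['/', 'M', 'T'] v (by decide) hvfree]
    rfl
  rw [hsplit, hdrop]
  simp [PySem.List.pyGet?, PySem.List.pyIdx?]

-- Hand port of Python's s.replace('-', '/', n) (PySem has no count-limited replace):
-- exact for the single-character old/new used here.
def pvReplaceDash (l : List Char) (n : Nat) : List Char :=
  match l, n with
  | l, 0 => l
  | [], _ => []
  | c :: t, n + 1 => if c = '-' then '/' :: pvReplaceDash t n else c :: pvReplaceDash t (n + 1)

-- Termination weight of one pending element of A's loop: 1, +1 if it still holds a ':'.
def pvWeight (s : String) : Nat := 1 + (if ':' ∈ s.toList then 1 else 0)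

-- A's loop: `done` = prefix already passed, `rest` = live list from the current index on;
-- the '/MT:' branch re-visits the inserted number token next iteration, exactly as
-- Python's enumerate over the mutated list does.  The two .getD defaults are dead:
-- split? of a nonempty separator is some, and splitOn never returns [].
def pvLoopA (done rest : List String) : List String :=
  match rest with
  | [] => done
  | arg :: rs =>
    if h : (PySem.Str.startswith arg "/MT:" && (PySem.Str.count arg ":" == 1)) = true then
      pvLoopA (done ++ ["/MT"])
        (((PySem.List.pyGet? ((PySem.Str.split? arg ":").getD []) (-1)).getD "") :: rs)
    else if PySem.Str.startswith arg "--" then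
      pvLoopA (done ++ [String.ofList (pvReplaceDash arg.toList 2)]) rs
    else if PySem.Str.startswith arg "-" then
      pvLoopA (done ++ [String.ofList (pvReplaceDash arg.toList 1)]) rs
    else
      pvLoopA (done ++ [arg]) rs
  termination_by (rest.map pvWeight).sum
  decreasing_by
  · rw [Bool.and_eq_true] at h
    obtain ⟨h1, h2⟩ := h
    obtain ⟨hin, hfree, htail⟩ := pvMT_split arg h1 (by simpa using h2)
    rw [htail]
    simp only [List.map_cons, List.sum_cons, pvWeight]
    simp [hin, hfree]
  · simp only [List.map_cons, List.sum_cons, pvWeight]; omega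
  · simp only [List.map_cons, List.sum_cons, pvWeight]; omega
  · simp only [List.map_cons, List.sum_cons, pvWeight]; omega

def coerceArgsToArgparseCompatible (args : List String) : List String := pvLoopA [] args

-- ===== PORT B =====

-- transform(arg) of Source B: one token expands to a list, recursing on the '/MT:' payload.
def pvTransform (arg : String) : List String :=
  if _h : (PySem.Str.startswith arg "/MT:" && (PySem.Str.count arg ":" == 1)) = true then
    "/MT" :: pvTransform (String.ofList (PySem.Chars.slice arg.toList (some 4) none))
  else if PySem.Str.startswith arg "--" then
    [String.ofList ('/' :: '/' :: PySem.Chars.slice arg.toList (some 2) none)]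
  else if PySem.Str.startswith arg "-" then
    [String.ofList ('/' :: PySem.Chars.slice arg.toList (some 1) none)]
  else
    [arg]
  termination_by arg.toList.length
  decreasing_by
    rw [Bool.and_eq_true] at _h
    have h1 := _h.1
    rw [PySem.Str.startswith_eq] at h1
    have hpre : ("/MT:".toList) <+: arg.toList := (PySem.Chars.startswith_iff _ _).mp h1
    have h4 : 4 ≤ arg.toList.length := by simpa using hpre.length_le
    have hlen : (String.ofList (PySem.Chars.slice arg.toList (some 4) none)).toList.length
        = arg.toList.length - 4 := by
      simp [PySem.List.slice_from (xs := arg.toList) (a := 4) (by norm_num)]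
    omega

def coerceArgsToArgparseCompatible_alt (args : List String) : List String :=
  args.foldl (fun out arg => out ++ pvTransform arg) []

-- ===== PRECONDITION & SPEC =====
def Spec_coerceArgsToArgparseCompatible (args : List String) (out : List String) : Prop := out = coerceArgsToArgparseCompatible_alt args
instance (args : List String) (out : List String) : Decidable (Spec_coerceArgsToArgparseCompatible args out) := by unfold Spec_coerceArgsToArgparseCompatible; infer_instance

-- ===== CLAIM (what is proved, stated in full; the proofs are below) =====
def Claim_equal_coerceArgsToArgparseCompatible : Prop := ∀ (args : List String), Dom_coerceArgsToArgparseCompatible args → Spec_coerceArgsToArgparseCompatible args (coerceArgsToArgparseCompatible args)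

-- ===== LEMMAS AND PROOFS =====

lemma pvReplaceDash_zero (l : List Char) : pvReplaceDash l 0 = l := by
  cases l <;> rfl

-- A's loop equals the fold of B's token expansion over the pending elements.
lemma pvLoop_foldl : ∀ (n : Nat) (rest done : List String), (rest.map pvWeight).sum ≤ n →
    pvLoopA done rest = rest.foldl (fun out arg => out ++ pvTransform arg) done := by
  intro n
  induction n with
  | zero =>
    intro rest done h
    match rest with
    | [] => simp [pvLoopA]
    | arg :: rs => simp [pvWeight] at h
  | succ n ih =>
    intro rest done h
    match rest with
    | [] => simp [pvLoopA]
    | arg :: rs =>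
      rw [pvLoopA, List.foldl_cons]
      by_cases hg : (PySem.Str.startswith arg "/MT:" && (PySem.Str.count arg ":" == 1)) = true
      · rw [dif_pos hg]
        have hpair := hg
        rw [Bool.and_eq_true] at hpair
        obtain ⟨h1, h2⟩ := hpair
        obtain ⟨hin, hfree, htail⟩ := pvMT_split arg h1 (by simpa using h2)
        have hslice : PySem.Chars.slice arg.toList (some 4) none = arg.toList.drop 4 := by
          simp [PySem.List.slice_from (xs := arg.toList) (a := 4) (by norm_num)]
        have htr : pvTransform arg = "/MT" :: pvTransform (String.ofList (arg.toList.drop 4)) := by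
          rw [pvTransform.eq_def, dif_pos hg, hslice]
        rw [htail]
        have hwt : pvWeight (String.ofList (arg.toList.drop 4)) = 1 := by
          simp [pvWeight, hfree]
        have hle : ((String.ofList (arg.toList.drop 4) :: rs).map pvWeight).sum ≤ n := by
          simp only [List.map_cons, List.sum_cons, hwt] at *
          simp [pvWeight, hin] at h
          omega
        rw [ih _ _ hle, htr]
        simp
      · rw [dif_neg hg]
        have hle : (rs.map pvWeight).sum ≤ n := by
          simp only [List.map_cons, List.sum_cons, pvWeight] at h
          omega
        by_cases h2 : PySem.Str.startswith arg "--" = true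
        · rw [if_pos h2, ih _ _ hle]
          have hpre : ("--".toList) <+: arg.toList := by
            rw [PySem.Str.startswith_eq] at h2
            exact (PySem.Chars.startswith_iff _ _).mp h2
          obtain ⟨t, ht⟩ := hpre
          have harg : arg.toList = '-' :: '-' :: t := ht.symm
          have : pvTransform arg = [String.ofList (pvReplaceDash arg.toList 2)] := by
            rw [pvTransform.eq_def, dif_neg hg, if_pos h2]
            have hslice : PySem.Chars.slice arg.toList (some 2) none = t := by
              rw [harg]
              simp [PySem.List.slice_from (xs := ('-' :: '-' :: t : List Char)) (a := 2) (by norm_num)]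
            rw [hslice, harg]
            simp [pvReplaceDash, pvReplaceDash_zero]
          rw [this]
        · rw [if_neg h2]
          by_cases h3 : PySem.Str.startswith arg "-" = true
          · rw [if_pos h3, ih _ _ hle]
            have hpre : ("-".toList) <+: arg.toList := by
              rw [PySem.Str.startswith_eq] at h3
              exact (PySem.Chars.startswith_iff _ _).mp h3
            obtain ⟨t, ht⟩ := hpre
            have harg : arg.toList = '-' :: t := ht.symm
            have : pvTransform arg = [String.ofList (pvReplaceDash arg.toList 1)] := by
              rw [pvTransform.eq_def, dif_neg hg, if_neg h2, if_pos h3]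
              have hslice : PySem.Chars.slice arg.toList (some 1) none = t := by
                rw [harg]
                simp [PySem.List.slice_from (xs := ('-' :: t : List Char)) (a := 1) (by norm_num)]
              rw [hslice, harg]
              simp [pvReplaceDash, pvReplaceDash_zero]
            rw [this]
          · rw [if_neg h3, ih _ _ hle]
            have : pvTransform arg = [arg] := by
              rw [pvTransform.eq_def, dif_neg hg, if_neg h2, if_neg h3]
            rw [this]

-- ===== VERDICT (by name: the statement is the Claim_ definition above) =====
theorem coerceArgsToArgparseCompatible_spec : Claim_equal_coerceArgsToArgparseCompatible := by
  intro args _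
  unfold Spec_coerceArgsToArgparseCompatible coerceArgsToArgparseCompatible coerceArgsToArgparseCompatible_alt
  exact pvLoop_foldl ((args.map pvWeight).sum) args [] (le_refl _)
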